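-- pv_equiv track=rewrite | github.com/ebiscaia/hackerrank | inverBits.py | flippingBits
-- ===== SOURCE A (Python) =====
-- def maxPower(n):
--     i = 0
--     while pow(2, i) <= n:
--         i += 1
--     if n == 0:
--         i = 1
--     return i
--
-- def binary(n, lenN):
--     bin = ""
--     if n == 0:
--         return "0"
--     while lenN >= 0:
--         if n >= pow(2, lenN):
--             bin += "1"
--             n -= pow(2, lenN)
--         else:
--             bin += "0"
--         lenN -= 1
--     return bin
--
-- def bin32(bin):
--     return "0" * (32 - len(bin)) + bin
--
-- def flipDigits(bin32Number):
--     flippedNumber = ""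
--     for _ in bin32Number:
--         if _ == "0":
--             flippedNumber += "1"
--         else:
--             flippedNumber += "0"
--     return flippedNumber
--
-- def flippingBits(n):
--     lenN = maxPower(n)
--     bin = binary(n, lenN)
--     bin32Numb = bin32(bin)
--     flippedNumber = flipDigits(bin32Numb)
--     flippedNumberDecimal = 0
--     index = -1
--     while index > -33:
--         if flippedNumber[index] == "1":
--             flippedNumberDecimal += pow(2, -index - 1)
--         index -= 1
--     return flippedNumberDecimal
-- ===== SOURCE B (Python) =====
-- def flippingBits(n):
--     # Flip the lower 32 bits directly: n % 2**32 is the low-32-bit value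
--     # (two's complement for negative n), and subtracting it from 2**32 - 1
--     # complements every one of those 32 bits.
--     return 0xFFFFFFFF - n % 0x100000000
-- ===== Notes on version B (the rewrite author's own statement) =====
-- stated objective: simpler
-- what changed: Replaced the whole string pipeline (maxPower/binary/bin32/flipDigits plus the reconstruction loop over negative indices) by one arithmetic expression 0xFFFFFFFF - n % 2**32, which complements the low 32 bits directly.
-- intended difference: For negative n, A's binary() helper degenerates to the single digit '0' so A returns 4294967295 regardless of n, while B returns the complement of n's actual low 32 bits (two's-complement), which is the intended meaning of flipping the lower 32 bits. — e.g. on flippingBits(-1): A returns 4294967295, B returns 0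
import Mathlib
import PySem

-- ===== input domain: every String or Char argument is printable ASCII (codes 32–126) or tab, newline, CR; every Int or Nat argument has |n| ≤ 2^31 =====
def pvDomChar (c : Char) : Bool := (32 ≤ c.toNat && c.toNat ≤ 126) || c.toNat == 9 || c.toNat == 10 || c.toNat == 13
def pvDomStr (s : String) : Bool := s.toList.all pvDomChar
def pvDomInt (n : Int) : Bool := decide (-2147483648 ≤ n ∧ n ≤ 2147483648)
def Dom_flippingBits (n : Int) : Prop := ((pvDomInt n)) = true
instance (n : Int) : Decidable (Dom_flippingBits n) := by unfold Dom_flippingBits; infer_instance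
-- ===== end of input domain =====

-- B replaces A's string pipeline by one arithmetic expression (simpler); on negative n
-- (the D_ region below) A returns 4294967295 while B flips the actual low 32 bits.

-- ===== PORT A =====
-- Python strings are ported as List Char; each while-loop is the obvious structural
-- recursion over the same state (the string accumulators are built digit by digit in
-- the same order, producing the same string).

-- while pow(2, i) <= n: i += 1
def maxPowerLoop (n : Int) (i : Nat) : Nat :=
  if (2 : Int) ^ i ≤ n then maxPowerLoop n (i + 1) else i
termination_by (n + 1 - 2 ^ i).toNat
decreasing_by
  have h1 : (0 : Int) < 2 ^ i := by positivity
  omega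

def maxPower (n : Int) : Nat :=
  let i := maxPowerLoop n 0
  if n = 0 then 1 else i

-- while lenN >= 0: … (appending one digit per iteration)
def binaryLoop (n : Int) (lenN : Int) : List Char :=
  if h : 0 ≤ lenN then
    if n ≥ (2 : Int) ^ lenN.toNat then '1' :: binaryLoop (n - 2 ^ lenN.toNat) (lenN - 1)
    else '0' :: binaryLoop n (lenN - 1)
  else []
termination_by (lenN + 1).toNat
decreasing_by all_goals omega

def binaryA (n : Int) (lenN : Int) : List Char :=
  if n = 0 then ['0'] else binaryLoop n lenN

def bin32A (bin : List Char) : List Char :=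
  List.replicate (32 - bin.length) '0' ++ bin

def flipDigits (bin32Number : List Char) : List Char :=
  bin32Number.map (fun c => if c = '0' then '1' else '0')

-- while index > -33: … (negative indexing from the end, as in Python; the index is
-- always in range for the strings A builds, so getD is only a totality default)
def flipLoop (s : List Char) (acc : Int) (index : Int) : Int :=
  if index > -33 then
    flipLoop s
      (if PySem.List.pyGet? s index = some '1' then acc + 2 ^ (-index - 1).toNat else acc)
      (index - 1)
  else acc
termination_by (index + 33).toNat
decreasing_by omega

def flippingBits (n : Int) : Int :=
  let lenN := maxPower n
  let bin := binaryA n (lenN : Int)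
  let bin32Numb := bin32A bin
  let flippedNumber := flipDigits bin32Numb
  flipLoop flippedNumber 0 (-1)

-- ===== PORT B =====
def flippingBits_alt (n : Int) : Int :=
  4294967295 - PySem.Int.mod n 4294967296

-- ===== PRECONDITION & SPEC =====
-- For negative n, A's binary() helper degenerates to the single digit '0' so A returns
-- 4294967295 regardless of n, while B returns the complement of n's actual low 32 bits
-- (two's-complement), which is the intended meaning of flipping the lower 32 bits.
def D_flippingBits (n : Int) : Prop := n < 0
instance (n : Int) : Decidable (D_flippingBits n) := by unfold D_flippingBits; infer_instance

def Spec_flippingBits (n : Int) (out : Int) : Prop := ¬ D_flippingBits n → out = flippingBits_alt n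
instance (n : Int) (out : Int) : Decidable (Spec_flippingBits n out) := by unfold Spec_flippingBits; infer_instance

def pvDiffWitness_flippingBits : Int := -1
def pvDiffWitnessOut_flippingBits : Int × Int := (4294967295, 0)

-- ===== CLAIM (what is proved, stated in full; the proofs are below) =====
def Claim_unchanged_flippingBits : Prop := ∀ (n : Int), Dom_flippingBits n → Spec_flippingBits n (flippingBits n)
def Claim_changed_flippingBits : Prop := Dom_flippingBits (pvDiffWitness_flippingBits) ∧ D_flippingBits (pvDiffWitness_flippingBits) ∧ flippingBits (pvDiffWitness_flippingBits) = pvDiffWitnessOut_flippingBits.1 ∧ flippingBits_alt (pvDiffWitness_flippingBits) = pvDiffWitnessOut_flippingBits.2 ∧ pvDiffWitnessOut_flippingBits.1 ≠ pvDiffWitnessOut_flippingBits.2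
def Claim_exact_flippingBits : Prop := ∀ (n : Int), Dom_flippingBits n → D_flippingBits n → flippingBits n ≠ flippingBits_alt n

-- ===== LEMMAS AND PROOFS =====

-- the integer a bit string denotes, most significant digit first
def bitsVal (l : List Char) : Int :=
  l.foldl (fun a c => 2 * a + (if c = '1' then 1 else 0)) 0

theorem bitsVal_foldl (l : List Char) (a : Int) :
    l.foldl (fun a c => 2 * a + (if c = '1' then 1 else 0)) a
      = a * 2 ^ l.length + bitsVal l := by
  induction l generalizing a with
  | nil => simp [bitsVal]
  | cons c t ih =>
    simp only [List.foldl, bitsVal, List.length_cons]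
    rw [ih, ih (2 * 0 + _)]
    ring

theorem bitsVal_cons (c : Char) (t : List Char) :
    bitsVal (c :: t) = (if c = '1' then 1 else 0) * 2 ^ t.length + bitsVal t := by
  simp only [bitsVal, List.foldl]
  rw [bitsVal_foldl]
  norm_num [bitsVal]

theorem bitsVal_append_singleton (l : List Char) (c : Char) :
    bitsVal (l ++ [c]) = 2 * bitsVal l + (if c = '1' then 1 else 0) := by
  simp [bitsVal, List.foldl_append]

theorem bitsVal_replicate_zero_append (m : Nat) (l : List Char) :
    bitsVal (List.replicate m '0' ++ l) = bitsVal l := by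
  induction m with
  | zero => simp
  | succ k ih => simpa [List.replicate_succ, bitsVal_cons, bitsVal] using ih

-- maxPowerLoop returns an exponent strictly above n, bounded when n is
theorem maxPowerLoop_gt (n : Int) (i : Nat) : n < 2 ^ maxPowerLoop n i := by
  induction i using maxPowerLoop.induct n with
  | case1 i h ih => rw [maxPowerLoop, if_pos h]; exact ih
  | case2 i h => rw [maxPowerLoop, if_neg h]; omega

theorem maxPowerLoop_le (n : Int) (B : Nat) (hn : n < 2 ^ B) :
    ∀ i : Nat, i ≤ B → maxPowerLoop n i ≤ B := by
  intro i
  induction i using maxPowerLoop.induct n with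
  | case1 i h ih =>
    intro hi
    rw [maxPowerLoop, if_pos h]
    apply ih
    by_contra hc
    have hiB : i = B := by omega
    subst hiB
    omega
  | case2 i h =>
    intro hi
    rw [maxPowerLoop, if_neg h]; exact hi

-- binaryLoop produces exactly lenN+1 binary digits denoting n
theorem binaryLoop_spec (k : Nat) : ∀ n : Int, 0 ≤ n → n < 2 ^ (k + 1) →
    (binaryLoop n (k : Int)).length = k + 1 ∧ bitsVal (binaryLoop n (k : Int)) = n ∧
      ∀ c ∈ binaryLoop n (k : Int), c = '0' ∨ c = '1' := by
  induction k with
  | zero =>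
    intro n h0 h1
    norm_num at h1
    rw [binaryLoop]
    simp only [Nat.cast_zero, Int.toNat_zero, pow_zero, ge_iff_le]
    rw [dif_pos (by omega : (0:Int) ≤ 0)]
    by_cases h : (1 : Int) ≤ n
    · rw [if_pos h, binaryLoop, dif_neg (by omega : ¬ (0:Int) ≤ 0 - 1)]
      refine ⟨rfl, ?_, by simp⟩
      have hv : bitsVal ['1'] = 1 := by decide
      rw [hv]; omega
    · rw [if_neg h, binaryLoop, dif_neg (by omega : ¬ (0:Int) ≤ 0 - 1)]
      refine ⟨rfl, ?_, by simp⟩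
      have hv : bitsVal ['0'] = 0 := by decide
      rw [hv]; omega

  | succ m ih =>
    intro n h0 h1
    rw [binaryLoop]
    rw [dif_pos (by positivity : (0:Int) ≤ ((m + 1 : Nat) : Int))]
    have htn : (((m + 1 : Nat) : Int)).toNat = m + 1 := by simp
    have hm1 : (((m + 1 : Nat) : Int)) - 1 = ((m : Nat) : Int) := by push_cast; ring
    rw [htn, hm1]
    by_cases h : n ≥ (2 : Int) ^ (m + 1)
    · rw [if_pos h]
      have h2 : (2 : Int) ^ (m + 1 + 1) = 2 ^ (m + 1) + 2 ^ (m + 1) := by ring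
      obtain ⟨hl, hv, hb⟩ := ih (n - 2 ^ (m + 1)) (by omega) (by omega)
      refine ⟨by simp [hl], ?_, ?_⟩
      · rw [bitsVal_cons, hl, hv]; simp
      · intro c hc
        rcases List.mem_cons.1 hc with hc | hc
        · right; exact hc
        · exact hb c hc
    · rw [if_neg h]
      obtain ⟨hl, hv, hb⟩ := ih n h0 (by omega)
      refine ⟨by simp [hl], ?_, ?_⟩
      · rw [bitsVal_cons, hl, hv]; simp
      · intro c hc
        rcases List.mem_cons.1 hc with hc | hc
        · left; exact hc
        · exact hb c hc

-- flipping a binary string complements its value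
theorem bitsVal_flip (l : List Char) (hb : ∀ c ∈ l, c = '0' ∨ c = '1') :
    bitsVal (flipDigits l) = 2 ^ l.length - 1 - bitsVal l := by
  induction l with
  | nil => simp [flipDigits, bitsVal]
  | cons c t ih =>
    have hc := hb c (by simp)
    have ht := ih (fun c hc => hb c (by simp [hc]))
    simp only [flipDigits, List.map] at ht ⊢
    rw [bitsVal_cons, bitsVal_cons, List.length_map]
    rcases hc with hc | hc <;> subst hc <;> simp [ht, List.length_cons] <;> ring

-- the final Python loop reads the last 32 characters, least significant first
theorem flipLoop_aux (s : List Char) (hs : 32 ≤ s.length) :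
    ∀ m : Nat, m ≤ 32 → ∀ acc : Int,
      flipLoop s acc ((m : Int) - 33)
        = acc + 2 ^ (32 - m) * bitsVal (List.take m (s.drop (s.length - 32))) := by
  intro m
  induction m with
  | zero => intro _ acc; rw [flipLoop]; norm_num [bitsVal]
  | succ m ih =>
    intro hm acc
    set t := s.drop (s.length - 32) with htdef
    have htlen : t.length = 32 := by simp [htdef]; omega
    have hm32 : m < t.length := by omega
    have hidx : ((m + 1 : Nat) : Int) - 33 = -(((32 - m : Nat) : Int)) := by
      push_cast [Nat.cast_sub (by omega : m ≤ 32)]; ring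
    have hget : PySem.List.pyGet? s (((m + 1 : Nat) : Int) - 33) = some t[m] := by
      rw [hidx, PySem.List.pyGet?_neg_natCast s (32 - m) (by omega) (by omega)]
      have hix : s.length - (32 - m) = (s.length - 32) + m := by omega
      rw [hix, ← List.getElem?_drop, ← htdef, List.getElem?_eq_getElem hm32]
    have htake : List.take (m + 1) t = List.take m t ++ [t[m]] := by
      rw [List.take_add_one]
      simp [List.getElem?_eq_getElem hm32]
    rw [flipLoop, if_pos (by omega : ((m + 1 : Nat) : Int) - 33 > -33)]
    have hstep : (((m + 1 : Nat) : Int) - 33) - 1 = ((m : Nat) : Int) - 33 := by push_cast; ring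
    have hpow : (-(((m + 1 : Nat) : Int) - 33) - 1).toNat = 31 - m := by omega
    simp only [hget, hpow, hstep, Option.some.injEq]
    rw [ih (by omega), htake, bitsVal_append_singleton]
    have hs31 : 32 - (m + 1) = 31 - m := by omega
    have h2 : (2 : Int) ^ (32 - m) = 2 ^ (31 - m) * 2 := by
      rw [← pow_succ]
      congr 1
      omega
    rw [hs31, h2]
    by_cases hb : t[m] = '1' <;> simp [hb] <;> ring

-- the whole tail of A's pipeline, for a digit string of at most 32 binary digits
theorem pipeline32 (digits : List Char) (hlen : digits.length ≤ 32)
    (hb : ∀ c ∈ digits, c = '0' ∨ c = '1') :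
    flipLoop (flipDigits (bin32A digits)) 0 (-1) = 2 ^ 32 - 1 - bitsVal digits := by
  set padded := bin32A digits with hpdef
  have hplen : padded.length = 32 := by simp [hpdef, bin32A]; omega
  have hpb : ∀ c ∈ padded, c = '0' ∨ c = '1' := by
    intro c hc
    rcases List.mem_append.1 hc with hc | hc
    · left; exact List.eq_of_mem_replicate hc
    · exact hb c hc
  have hpval : bitsVal padded = bitsVal digits := bitsVal_replicate_zero_append _ _
  have hflen : (flipDigits padded).length = 32 := by simp [flipDigits, hplen]
  have h := flipLoop_aux (flipDigits padded) (by omega) 32 (le_refl _) 0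
  have hm1 : ((32 : Nat) : Int) - 33 = -1 := by norm_num
  rw [hm1] at h
  rw [h]
  have hdrop : (flipDigits padded).drop ((flipDigits padded).length - 32) = flipDigits padded := by
    rw [hflen]; simp
  rw [hdrop, List.take_of_length_le (by omega), bitsVal_flip padded hpb, hplen, hpval]
  norm_num

-- A computes 2^32 - 1 - n for 0 ≤ n ≤ 2^31
theorem flippingBits_eval_nonneg (n : Int) (h0 : 0 ≤ n) (h1 : n ≤ 2 ^ 31) :
    flippingBits n = 2 ^ 32 - 1 - n := by
  by_cases hz : n = 0
  · subst hz
    have : flippingBits 0 = flipLoop (flipDigits (bin32A ['0'])) 0 (-1) := by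
      simp [flippingBits, binaryA]
    rw [this, pipeline32 ['0'] (by simp) (by simp)]
    simp [bitsVal]
  · have hL := maxPowerLoop_gt n 0
    set L := maxPowerLoop n 0 with hLdef
    have hmp : maxPower n = L := by rw [maxPower, if_neg hz]
    have hA : flippingBits n = flipLoop (flipDigits (bin32A (binaryLoop n (L : Int)))) 0 (-1) := by
      simp [flippingBits, binaryA, hz, hmp]
    by_cases hlt : n < 2 ^ 31
    · -- then L ≤ 31 and the digit string has at most 32 digits
      have hL31 : L ≤ 31 := maxPowerLoop_le n 31 hlt 0 (by omega)
      obtain ⟨hlen, hval, hbin⟩ := binaryLoop_spec L n h0 (by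
        have : (2 : Int) ^ L ≤ 2 ^ (L + 1) := by
          apply pow_le_pow_right₀ <;> omega
        omega)
      rw [hA, pipeline32 _ (by omega) hbin, hval]
    · -- n = 2^31 exactly; then L = 32 and the leading digit is '0'
      have hn : n = 2 ^ 31 := by omega
      have hL32u : L ≤ 32 := maxPowerLoop_le n 32 (by rw [hn]; norm_num) 0 (by omega)
      have hL32l : 31 < L := by
        by_contra hc
        have : (2 : Int) ^ L ≤ 2 ^ 31 := by
          apply pow_le_pow_right₀ <;> omega
        omega
      have hL32 : L = 32 := by omega
      obtain ⟨hlen, hval, hbin⟩ := binaryLoop_spec 31 n h0 (by rw [hn]; norm_num)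
      simp only [Nat.cast_ofNat] at hlen hval hbin
      have hsplit : binaryLoop n (32 : Int) = '0' :: binaryLoop n (31 : Int) := by
        rw [binaryLoop, dif_pos (by norm_num)]
        rw [if_neg (by
          simp only [show ((32 : Int)).toNat = 32 from rfl]
          rw [hn]; norm_num)]
        congr 2
      rw [hL32] at hA
      simp only [Nat.cast_ofNat] at hA
      rw [hsplit] at hA
      have hpad : bin32A ('0' :: binaryLoop n (31 : Int)) = '0' :: binaryLoop n (31 : Int) := by
        simp [bin32A, List.length_cons, hlen]
      rw [hpad] at hA
      have hfl : flipDigits ('0' :: binaryLoop n (31 : Int)) = '1' :: flipDigits (binaryLoop n (31 : Int)) := by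
        simp [flipDigits]
      rw [hfl] at hA
      have hflen : (flipDigits (binaryLoop n (31 : Int))).length = 32 := by
        simp [flipDigits, hlen]
      have h := flipLoop_aux ('1' :: flipDigits (binaryLoop n (31 : Int)))
        (by simp [hflen]) 32 (le_refl _) 0
      have hm1 : ((32 : Nat) : Int) - 33 = -1 := by norm_num
      rw [hm1] at h
      have hdrop : ('1' :: flipDigits (binaryLoop n (31 : Int))).drop
          (('1' :: flipDigits (binaryLoop n (31 : Int))).length - 32)
          = flipDigits (binaryLoop n (31 : Int)) := by
        simp [hflen]
      rw [hdrop, List.take_of_length_le (by omega)] at h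
      rw [hA, h, bitsVal_flip _ hbin, hlen, hval]
      norm_num

-- A returns 4294967295 on every negative input
theorem flippingBits_eval_neg (n : Int) (hn : n < 0) : flippingBits n = 4294967295 := by
  have hmp : maxPowerLoop n 0 = 0 := by
    rw [maxPowerLoop, if_neg (by norm_num; omega)]
  have hbl : binaryLoop n 0 = ['0'] := by
    rw [binaryLoop, dif_pos (le_refl _), if_neg (by norm_num; omega),
        binaryLoop, dif_neg (by norm_num)]
  have hz : ¬ n = 0 := by omega
  have hA : flippingBits n = flipLoop (flipDigits (bin32A ['0'])) 0 (-1) := by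
    simp [flippingBits, binaryA, maxPower, hmp, hz, hbl]
  rw [hA, pipeline32 ['0'] (by simp) (by simp)]
  simp [bitsVal]

theorem mod_of_neg (n : Int) (h0 : -4294967296 < n) (h1 : n < 0) :
    PySem.Int.mod n 4294967296 = n + 4294967296 := by
  rw [PySem.Int.mod_eq_emod_of_pos (by norm_num)]
  omega

-- ===== VERDICT (by name: the statement is the Claim_ definition above) =====
theorem flippingBits_spec : Claim_unchanged_flippingBits := by
  intro n hdom hnd
  have hD : ¬ n < 0 := hnd
  have hdom' : -2147483648 ≤ n ∧ n ≤ 2147483648 := by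
    simpa [Dom_flippingBits, pvDomInt] using hdom
  have h := flippingBits_eval_nonneg n (by omega) (by norm_num; omega)
  rw [h, flippingBits_alt, PySem.Int.mod_eq_emod_of_pos (by norm_num)]
  have hmod : n % 4294967296 = n := by omega
  rw [hmod]
  norm_num

theorem flippingBits_changed : Claim_changed_flippingBits := by
  unfold Claim_changed_flippingBits
  refine ⟨by decide, by decide, ?_, by decide, by decide⟩
  exact flippingBits_eval_neg (-1) (by norm_num)

theorem flippingBits_tight : Claim_exact_flippingBits := by
  intro n hdom hD
  have hD' : n < 0 := hD
  have hdom' : -2147483648 ≤ n ∧ n ≤ 2147483648 := by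
    simpa [Dom_flippingBits, pvDomInt] using hdom
  rw [flippingBits_eval_neg n hD', flippingBits_alt, mod_of_neg n (by omega) hD']
  omega
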